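-- pv_equiv track=rewrite | github.com/RavenInDisguise/Python-Programs | Lab 02/libreriaMonicaJennifer.py | insertarElemento
-- ===== SOURCE A (Python) =====
-- def insertarElemento(lista,elemento1,elemento2):
--     """
--     Funcionalidad: Insertar el elemento 2 después del elemento 1.
--     y si está bien, elimina el último.
--     Entradas: Lista y elementos.
--     Salidas: Nueva lista con elementos insertados.
--     """
--     nuevaLista=[]
--     for i in lista:
--         if i==elemento1:
--             nuevaLista.extend([i,elemento2])
--         else:
--             nuevaLista.extend([i])
--     return nuevaLista
-- ===== SOURCE B (Python) =====
-- def insertarElemento(lista, elemento1, elemento2):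
--     # Two-phase: collect match positions, then insert back-to-front into a copy.
--     indices = [i for i, x in enumerate(lista) if x == elemento1]
--     nueva = list(lista)
--     for idx in reversed(indices):
--         nueva.insert(idx + 1, elemento2)
--     return nueva
-- ===== Notes on version B (the rewrite author's own statement) =====
-- stated objective: alternative
-- what changed: Replaces A's single forward accumulate pass with a two-phase approach: first collect all indices of elemento1 via enumerate, then insert elemento2 after each occurrence by mutating a copy back-to-front with list.insert.
import Mathlib
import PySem

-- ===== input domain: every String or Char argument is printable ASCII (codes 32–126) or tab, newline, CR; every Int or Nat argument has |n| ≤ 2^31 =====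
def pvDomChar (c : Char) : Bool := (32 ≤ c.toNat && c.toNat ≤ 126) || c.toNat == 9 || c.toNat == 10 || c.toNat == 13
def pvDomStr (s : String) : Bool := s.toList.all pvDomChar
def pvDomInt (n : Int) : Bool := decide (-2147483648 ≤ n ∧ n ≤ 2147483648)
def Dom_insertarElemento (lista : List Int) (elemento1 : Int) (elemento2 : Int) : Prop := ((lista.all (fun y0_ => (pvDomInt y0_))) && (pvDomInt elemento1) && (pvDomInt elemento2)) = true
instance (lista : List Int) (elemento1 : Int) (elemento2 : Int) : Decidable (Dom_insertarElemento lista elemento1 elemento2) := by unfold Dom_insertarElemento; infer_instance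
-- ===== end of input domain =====

-- ===== PORT A =====

-- B inserts elemento2 after each occurrence two-phase (collect indices, then reversed list.insert
-- into a copy) instead of A's single forward accumulate pass; same result, alternative structure.

-- ===== PORT A =====
def insertarElemento (lista : List Int) (elemento1 : Int) (elemento2 : Int) : List Int :=
  lista.foldl (fun nuevaLista i =>
    if i == elemento1 then nuevaLista ++ [i, elemento2] else nuevaLista ++ [i]) []

-- ===== PORT B =====
def insertarElemento_alt (lista : List Int) (elemento1 : Int) (elemento2 : Int) : List Int :=
  let indices := ((PySem.List.enumerate lista).filter (fun p => p.2 == elemento1)).map (·.1)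
  indices.reverse.foldl (fun nueva idx => PySem.List.insert nueva (idx + 1) elemento2) lista

-- ===== PRECONDITION & SPEC =====
def Spec_insertarElemento (lista : List Int) (elemento1 : Int) (elemento2 : Int) (out : List Int) : Prop := out = insertarElemento_alt lista elemento1 elemento2
instance (lista : List Int) (elemento1 : Int) (elemento2 : Int) (out : List Int) : Decidable (Spec_insertarElemento lista elemento1 elemento2 out) := by unfold Spec_insertarElemento; infer_instance

-- ===== CLAIM (what is proved, stated in full; the proofs are below) =====
def Claim_equal_insertarElemento : Prop := ∀ (lista : List Int) (elemento1 : Int) (elemento2 : Int), Dom_insertarElemento lista elemento1 elemento2 → Spec_insertarElemento lista elemento1 elemento2 (insertarElemento lista elemento1 elemento2)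

-- ===== LEMMAS AND PROOFS =====

-- Python's list.insert clamps; for index ≥ 1 it commutes with cons.
theorem pvInsert_cons_shift (a v : Int) (l : List Int) (i : Int) (h : 1 ≤ i) :
    PySem.List.insert (a :: l) i v = a :: PySem.List.insert l (i - 1) v := by
  simp only [PySem.List.insert, PySem.List.sliceIndices, List.length_cons]
  have h1 : ¬ (i < 0) := by omega
  have h2 : ¬ (i - 1 < 0) := by omega
  have h3 : ¬ ((1:Int) < 0) := by omega
  simp only [h1, h2, h3, if_false]
  have key : (min i ((l.length + 1 : Nat) : Int)).toNat = (min (i-1) (↑l.length)).toNat + 1 := by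
    push_cast; omega
  rw [key]
  simp [List.take_succ_cons, List.drop_succ_cons]

-- Shifting the enumerate start by one shifts every collected index by one.
theorem pvEnum_shift (xs : List Int) (e : Int) : ∀ (s : Int),
    ((PySem.List.enumerate xs (s+1)).filter (fun p => p.2 == e)).map (·.1)
    = ((((PySem.List.enumerate xs s).filter (fun p => p.2 == e)).map (·.1)).map (· + 1)) := by
  induction xs with
  | nil => intro s; simp [PySem.List.enumerate]
  | cons x rest ih =>
    intro s
    simp only [PySem.List.enumerate_cons, List.filter_cons]
    by_cases hx : x == e
    · simp only [hx, if_pos, List.map_cons, ih (s+1)]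
    · simp only [hx, Bool.false_eq_true, if_false, ih (s+1)]

-- Folding insertions at shifted indices over a cons'd list leaves the head alone.
theorem pvFold_shift (e2 a : Int) : ∀ (js : List Int) (l : List Int), (∀ j ∈ js, 0 ≤ j) →
    (js.map (· + 1)).foldl (fun nueva idx => PySem.List.insert nueva (idx + 1) e2) (a :: l)
    = a :: js.foldl (fun nueva idx => PySem.List.insert nueva (idx + 1) e2) l := by
  intro js
  induction js with
  | nil => intro l _; simp
  | cons j rest ih =>
    intro l hnn
    have hj : (0:Int) ≤ j := hnn j (by simp)
    simp only [List.map_cons, List.foldl_cons]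
    rw [pvInsert_cons_shift a e2 l (j + 1 + 1) (by omega)]
    have : j + 1 + 1 - 1 = j + 1 := by ring
    rw [this]
    exact ih _ (fun x hx => hnn x (by simp [hx]))

-- Every index collected from enumerate (start 0) is nonnegative.
theorem pvIdx_nonneg (xs : List Int) (e : Int) :
    ∀ j ∈ ((PySem.List.enumerate xs 0).filter (fun p => p.2 == e)).map (·.1), 0 ≤ j := by
  intro j hj
  simp only [List.mem_map, List.mem_filter] at hj
  obtain ⟨p, ⟨hp, _⟩, rfl⟩ := hj
  rw [PySem.List.mem_enumerate_iff] at hp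
  obtain ⟨k, _, rfl⟩ := hp
  simp

-- Main induction: B's two-phase result equals the flatMap form.
theorem pvAlt_eq_flatMap (e1 e2 : Int) : ∀ (lista : List Int),
    insertarElemento_alt lista e1 e2
    = lista.flatMap (fun i => if i == e1 then [i, e2] else [i]) := by
  intro lista
  induction lista with
  | nil => simp [insertarElemento_alt, PySem.List.enumerate]
  | cons a rest ih =>
    have hrfl : insertarElemento_alt rest e1 e2
        = ((PySem.List.enumerate rest 0).filter (fun p => p.2 == e1) |>.map (·.1)).reverse.foldl
            (fun nueva idx => PySem.List.insert nueva (idx + 1) e2) rest := rfl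
    by_cases ha : a == e1
    · simp only [insertarElemento_alt, PySem.List.enumerate_cons, List.filter_cons, ha, if_pos,
        List.map_cons, List.reverse_cons, List.foldl_append, pvEnum_shift rest e1 0]
      rw [← List.map_reverse, pvFold_shift e2 a _ rest
        (fun j hj => pvIdx_nonneg rest e1 j (List.mem_reverse.mp hj))]
      rw [← hrfl, ih]
      simp only [List.foldl_cons, List.foldl_nil]
      rw [pvInsert_cons_shift a e2 _ (0 + 1) (by omega)]
      norm_num
      have ha' : a = e1 := by simpa using ha
      simp [ha', PySem.List.insert_zero]
    · simp only [insertarElemento_alt, PySem.List.enumerate_cons, List.filter_cons, ha,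
        Bool.false_eq_true, if_false, pvEnum_shift rest e1 0]
      rw [← List.map_reverse, pvFold_shift e2 a _ rest
        (fun j hj => pvIdx_nonneg rest e1 j (List.mem_reverse.mp hj))]
      rw [← hrfl, ih]
      have ha' : a ≠ e1 := by simpa using ha
      simp [List.flatMap_cons, ha']

-- ===== VERDICT (by name: the statement is the Claim_ definition above) =====
theorem insertarElemento_spec : Claim_equal_insertarElemento := by
  intro lista e1 e2 _
  unfold Spec_insertarElemento insertarElemento
  rw [pvAlt_eq_flatMap]
  have : ∀ (nuevaLista : List Int) (i : Int),
      (if i == e1 then nuevaLista ++ [i, e2] else nuevaLista ++ [i])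
      = nuevaLista ++ (if i == e1 then [i, e2] else [i]) := by
    intro nl i; by_cases h : i == e1 <;> simp [h]
  simp only [this]
  rw [PySem.List.foldl_append_eq_flatMap]
  simp
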